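-- pv_equiv track=rewrite | github.com/adityapatil123/hackerearth_practice | problems/illegible_string.py | get_min_and_max_len_of_string
-- ===== SOURCE A (Python) =====
-- def is_char_v_or_w(c):
--     return c in ["v", "w"]
--
-- def is_char_v(c):
--     return c == "v"
--
-- def get_min_and_max_of_v_w_substring(v_count, w_count):
--     max_count = 2*w_count + v_count
--     min_count = max_count // 2 + max_count % 2
--     return min_count, max_count
--
-- def get_min_and_max_len_of_string(str_len, string):
--     min_count, max_count = 0, 0
--     v_count, w_count = 0, 0
--     for i in range(str_len):
--         if is_char_v_or_w(string[i]):
--             if is_char_v(string[i]):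
--                 v_count += 1
--             else:
--                 w_count += 1
--
--             if i == str_len - 1 or not is_char_v_or_w(string[i+1]):
--                 min_count_s, max_count_s = get_min_and_max_of_v_w_substring(v_count, w_count)
--                 min_count += min_count_s
--                 max_count += max_count_s
--                 v_count, w_count = 0, 0
--         else:
--             min_count += 1
--             max_count += 1
--     return min_count, max_count
-- ===== SOURCE B (Python) =====
-- def get_min_and_max_len_of_string(str_len, string):
--     s = string[:max(0, str_len)]
--     min_total = max_total = 0
--     i, n = 0, len(s)
--     while i < n:
--         j = i
--         while j < n and (s[j] in "vw") == (s[i] in "vw"):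
--             j += 1
--         run = s[i:j]
--         if s[i] in "vw":
--             m = 2 * run.count("w") + run.count("v")
--             min_total += (m + 1) // 2
--             max_total += m
--         else:
--             min_total += j - i
--             max_total += j - i
--         i = j
--     return min_total, max_total
-- ===== Notes on version B (the rewrite author's own statement) =====
-- stated objective: simpler
-- what changed: B first slices the string to its first str_len characters and then walks it run by run (each maximal same-group run consumed in one inner scan, its whole contribution added at once), instead of A's per-character loop that carries pending v/w counters and detects run ends with an index lookahead.
import Mathlib
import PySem

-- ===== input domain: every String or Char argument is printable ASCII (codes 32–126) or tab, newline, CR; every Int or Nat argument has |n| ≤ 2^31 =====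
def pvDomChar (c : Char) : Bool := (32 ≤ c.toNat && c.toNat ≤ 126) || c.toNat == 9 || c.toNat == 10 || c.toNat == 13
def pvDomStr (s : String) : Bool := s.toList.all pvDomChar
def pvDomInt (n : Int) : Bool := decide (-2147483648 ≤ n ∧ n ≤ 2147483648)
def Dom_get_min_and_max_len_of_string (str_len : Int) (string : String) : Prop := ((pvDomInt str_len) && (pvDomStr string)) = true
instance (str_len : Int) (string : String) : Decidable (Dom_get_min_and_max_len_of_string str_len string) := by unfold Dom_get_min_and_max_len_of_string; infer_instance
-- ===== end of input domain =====

-- B slices off the first str_len characters and sums per-run contributions (one run per inner scan)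
-- instead of A's per-character loop with pending counters and an index lookahead; objective: simpler.

-- ===== PORT A =====
def is_char_v_or_w (c : Char) : Bool := ['v', 'w'].contains c

def is_char_v (c : Char) : Bool := c == 'v'

def get_min_and_max_of_v_w_substring (v_count w_count : Int) : Int × Int :=
  let max_count := 2 * w_count + v_count
  let min_count := PySem.Int.floordiv max_count 2 + PySem.Int.mod max_count 2
  (min_count, max_count)

def get_min_and_max_len_of_string (str_len : Int) (string : String) : Int × Int :=
  let cs := string.toList
  let st := (PySem.List.pyRange 0 str_len 1).foldl
    (fun (st : (Int × Int) × Int × Int) i =>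
      let ((min_count, max_count), v_count, w_count) := st
      let c := PySem.List.pyGetD cs i ' '   -- every read index is in range under Pre_
      if is_char_v_or_w c then
        let v_count := if is_char_v c then v_count + 1 else v_count
        let w_count := if is_char_v c then w_count else w_count + 1
        if i = str_len - 1 || !is_char_v_or_w (PySem.List.pyGetD cs (i + 1) ' ') then
          let p := get_min_and_max_of_v_w_substring v_count w_count
          ((min_count + p.1, max_count + p.2), 0, 0)
        else
          ((min_count, max_count), v_count, w_count)
      else
        ((min_count + 1, max_count + 1), v_count, w_count))
    ((0, 0), 0, 0)
  st.1

-- ===== PORT B =====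
def pvIsVW (c : Char) : Bool := c == 'v' || c == 'w'

-- run-by-run walk of Source B's outer while loop; the fuel argument only makes the recursion structural
def pvAltGoF : Nat → List Char → Int × Int
  | _, [] => (0, 0)
  | 0, _ :: _ => (0, 0)   -- unreachable: fuel ≥ length
  | fuel + 1, c :: rest =>
    let k := pvIsVW c
    let run := List.takeWhile (fun x => pvIsVW x == k) (c :: rest)
    let rest' := List.dropWhile (fun x => pvIsVW x == k) (c :: rest)
    let p := pvAltGoF fuel rest'
    if k then
      let m := 2 * (run.count 'w' : Int) + (run.count 'v' : Int)
      (PySem.Int.floordiv (m + 1) 2 + p.1, m + p.2)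
    else
      ((run.length : Int) + p.1, (run.length : Int) + p.2)

def pvAltGo (l : List Char) : Int × Int := pvAltGoF l.length l

def get_min_and_max_len_of_string_alt (str_len : Int) (string : String) : Int × Int :=
  pvAltGo (PySem.List.slice string.toList none (some (max 0 str_len)))

-- ===== PRECONDITION & SPEC =====
-- Pre_ excludes exactly the inputs where A raises IndexError: str_len larger than the string length.
def Pre_get_min_and_max_len_of_string (str_len : Int) (string : String) : Prop :=
  str_len ≤ (string.toList.length : Int)
instance (str_len : Int) (string : String) : Decidable (Pre_get_min_and_max_len_of_string str_len string) := by
  unfold Pre_get_min_and_max_len_of_string; infer_instance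

def pvWitness_get_min_and_max_len_of_string : Int × String := (3, "vwa")

def Spec_get_min_and_max_len_of_string (str_len : Int) (string : String) (out : Int × Int) : Prop := out = get_min_and_max_len_of_string_alt str_len string
instance (str_len : Int) (string : String) (out : Int × Int) : Decidable (Spec_get_min_and_max_len_of_string str_len string out) := by unfold Spec_get_min_and_max_len_of_string; infer_instance

-- ===== CLAIM (what is proved, stated in full; the proofs are below) =====
def Claim_equal_get_min_and_max_len_of_string : Prop := ∀ (str_len : Int) (string : String), Dom_get_min_and_max_len_of_string str_len string → Pre_get_min_and_max_len_of_string str_len string → Spec_get_min_and_max_len_of_string str_len string (get_min_and_max_len_of_string str_len string)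

-- ===== LEMMAS AND PROOFS =====

-- A's loop body as a named function (identical to the lambda in the port)
def pvStepA (cs : List Char) (str_len : Int) (st : (Int × Int) × Int × Int) (i : Int) : (Int × Int) × Int × Int :=
  let ((min_count, max_count), v_count, w_count) := st
  let c := PySem.List.pyGetD cs i ' '
  if is_char_v_or_w c then
    let v_count := if is_char_v c then v_count + 1 else v_count
    let w_count := if is_char_v c then w_count else w_count + 1
    if i = str_len - 1 || !is_char_v_or_w (PySem.List.pyGetD cs (i + 1) ' ') then
      let p := get_min_and_max_of_v_w_substring v_count w_count
      ((min_count + p.1, max_count + p.2), 0, 0)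
    else
      ((min_count, max_count), v_count, w_count)
  else
    ((min_count + 1, max_count + 1), v_count, w_count)

-- A's per-character loop replayed as structural recursion on the processed suffix, lookahead from the list.
def pvARecSt : List Char → ((Int × Int) × Int × Int) → ((Int × Int) × Int × Int)
  | [], st => st
  | c :: rest, st =>
    let ((a, b), v, w) := st
    pvARecSt rest (
      if is_char_v_or_w c then
        let v' := if is_char_v c then v + 1 else v
        let w' := if is_char_v c then w else w + 1
        if (match rest with | [] => true | d :: _ => !is_char_v_or_w d) then
          let p := get_min_and_max_of_v_w_substring v' w'
          ((a + p.1, b + p.2), 0, 0)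
        else ((a, b), v', w')
      else ((a + 1, b + 1), v, w))

theorem pvA_eq_fold (str_len : Int) (s : String) :
    get_min_and_max_len_of_string str_len s
      = ((PySem.List.pyRange 0 str_len 1).foldl (pvStepA s.toList str_len) ((0, 0), 0, 0)).1 := rfl

theorem pvGetD_mid (pre t : List Char) (c : Char) :
    PySem.List.pyGetD (pre ++ c :: t) (pre.length : Int) ' ' = c := by
  simp [PySem.List.pyGetD_natCast, List.getD_eq_getElem?_getD]

-- Lemma 1: the indexed fold over the window [pre.length, pre.length + l.length) equals the structural replay on l.
theorem pv_fold_eq_rec (l : List Char) : ∀ (pre extra : List Char) (st : (Int × Int) × Int × Int),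
    (PySem.List.pyRange (pre.length : Int) ((pre.length : Int) + (l.length : Int)) 1).foldl
        (pvStepA (pre ++ l ++ extra) ((pre.length : Int) + (l.length : Int))) st
      = pvARecSt l st := by
  induction l with
  | nil =>
    intro pre extra st
    rw [PySem.List.pyRange_one_eq_nil (by simp)]
    simp [pvARecSt]
  | cons c rest ih =>
    intro pre extra st
    rw [PySem.List.pyRange_one_cons (by simp only [List.length_cons]; push_cast; omega)]
    rw [List.foldl_cons]
    have hcs : pre ++ (c :: rest) ++ extra = pre ++ c :: (rest ++ extra) := by simp
    have hget : PySem.List.pyGetD (pre ++ (c :: rest) ++ extra) (pre.length : Int) ' ' = c := by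
      rw [hcs]; exact pvGetD_mid pre (rest ++ extra) c
    have hstep : pvStepA (pre ++ (c :: rest) ++ extra) ((pre.length : Int) + ((c :: rest).length : Int)) st (pre.length : Int)
        = (let ((a, b), v, w) := st
           if is_char_v_or_w c then
             let v' := if is_char_v c then v + 1 else v
             let w' := if is_char_v c then w else w + 1
             if (match rest with | [] => true | d :: _ => !is_char_v_or_w d) then
               let p := get_min_and_max_of_v_w_substring v' w'
               ((a + p.1, b + p.2), 0, 0)
             else ((a, b), v', w')
           else ((a + 1, b + 1), v, w)) := by
      obtain ⟨⟨a, b⟩, v, w⟩ := st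
      simp only [pvStepA, hget]
      cases rest with
      | nil => simp
      | cons d r2 =>
        have hne : ¬((pre.length : Int) = (pre.length : Int) + ((r2.length : Int) + 1 + 1) - 1) := by omega
        have hget2 : PySem.List.pyGetD (pre ++ c :: d :: (r2 ++ extra)) ((pre.length : Int) + 1) ' ' = d := by
          have h2 : pre ++ c :: d :: (r2 ++ extra) = (pre ++ [c]) ++ d :: (r2 ++ extra) := by simp
          have h3 : (pre.length : Int) + 1 = (((pre ++ [c]).length : Nat) : Int) := by simp
          rw [h2, h3]; exact pvGetD_mid (pre ++ [c]) (r2 ++ extra) d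
        simp [hne, hget2]
    rw [hstep]
    have hpre' : (pre.length : Int) + 1 = ((pre ++ [c]).length : Int) := by simp
    have hlen : (pre.length : Int) + ((c :: rest).length : Int) = ((pre ++ [c]).length : Int) + (rest.length : Int) := by
      simp; push_cast; ring
    have happ : pre ++ (c :: rest) ++ extra = (pre ++ [c]) ++ rest ++ extra := by simp
    rw [hpre', hlen, happ, ih (pre ++ [c]) extra]
    obtain ⟨⟨a, b⟩, v, w⟩ := st
    simp [pvARecSt]

-- fuel irrelevance for pvAltGoF
theorem pvAltGoF_irrel (f1 : Nat) : ∀ (f2 : Nat) (l : List Char), l.length ≤ f1 → l.length ≤ f2 → pvAltGoF f1 l = pvAltGoF f2 l := by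
  induction f1 with
  | zero =>
    intro f2 l h1 _
    cases l with
    | nil => cases f2 <;> rfl
    | cons c r => simp at h1
  | succ n ih =>
    intro f2 l h1 h2
    cases l with
    | nil => cases f2 <;> rfl
    | cons c rest =>
      cases f2 with
      | zero => simp at h2
      | succ m =>
        have hd : ∀ k : Nat, rest.length ≤ k → (List.dropWhile (fun x => pvIsVW x == pvIsVW c) (c :: rest)).length ≤ k := by
          intro k hk
          rw [List.dropWhile_cons_of_pos (by simp)]
          have := List.length_dropWhile_le (fun x => pvIsVW x == pvIsVW c) rest
          omega
        simp only [pvAltGoF]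
        rw [ih m _ (hd n (by simp at h1; omega)) (hd m (by simp at h2; omega))]

theorem pvAltGoF_eq (fuel : Nat) (l : List Char) (h : l.length ≤ fuel) : pvAltGoF fuel l = pvAltGo l :=
  pvAltGoF_irrel fuel l.length l h (Nat.le_refl _)

-- canonical cons equation for pvAltGo
theorem pvAltGo_cons (c : Char) (rest : List Char) :
    pvAltGo (c :: rest)
      = (let k := pvIsVW c
         let run := List.takeWhile (fun x => pvIsVW x == k) (c :: rest)
         let rest' := List.dropWhile (fun x => pvIsVW x == k) (c :: rest)
         let p := pvAltGo rest'
         if k then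
           let m := 2 * (run.count 'w' : Int) + (run.count 'v' : Int)
           (PySem.Int.floordiv (m + 1) 2 + p.1, m + p.2)
         else
           ((run.length : Int) + p.1, (run.length : Int) + p.2)) := by
  have hd2 : (List.dropWhile (fun x => pvIsVW x == pvIsVW c) (c :: rest)).length ≤ rest.length := by
    rw [List.dropWhile_cons_of_pos (by simp)]
    exact List.length_dropWhile_le _ rest
  show pvAltGoF (rest.length + 1) (c :: rest) = _
  simp only [pvAltGoF]
  rw [pvAltGoF_eq rest.length _ hd2]

-- ceiling identity: A's m//2 + m%2 equals B's (m+1)//2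
theorem pv_ceil_eq (m : Int) :
    PySem.Int.floordiv m 2 + PySem.Int.mod m 2 = PySem.Int.floordiv (m + 1) 2 := by
  rw [PySem.Int.floordiv_eq_ediv_of_pos (by omega), PySem.Int.floordiv_eq_ediv_of_pos (by omega),
      PySem.Int.mod_eq_emod_of_pos (by omega)]
  omega

-- run continuation on B's side: a v/w head merges its run into the head run
theorem pvVW_eq (c : Char) : is_char_v_or_w c = pvIsVW c := by
  simp [is_char_v_or_w, pvIsVW, beq_eq_decide]

theorem pvAltGo_cons_neg (c : Char) (rest : List Char) (hk : pvIsVW c = false) :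
    pvAltGo (c :: rest) = (1 + (pvAltGo rest).1, 1 + (pvAltGo rest).2) := by
  rw [pvAltGo_cons]
  cases rest with
  | nil => simp [hk, pvAltGo, pvAltGoF]
  | cons d r2 =>
    by_cases hd : pvIsVW d = true
    · simp [hk, hd]
    · rw [pvAltGo_cons]
      simp only [Bool.not_eq_true] at hd
      simp [hk, hd, List.takeWhile_cons, List.dropWhile_cons, Prod.ext_iff]
      constructor <;> push_cast <;> ring

-- Lemma on runs: pending counters v,w plus the rest of the v/w-run flush as one contribution.
theorem pv_run (rest : List Char) : ∀ (c : Char) (a b v w : Int), pvIsVW c = true →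
    pvARecSt (c :: rest) ((a, b), v, w)
      = pvARecSt (List.dropWhile pvIsVW rest)
          ((a + (PySem.Int.floordiv (2 * (w + ((c :: List.takeWhile pvIsVW rest).count 'w' : Int)) + (v + ((c :: List.takeWhile pvIsVW rest).count 'v' : Int))) 2
                 + PySem.Int.mod (2 * (w + ((c :: List.takeWhile pvIsVW rest).count 'w' : Int)) + (v + ((c :: List.takeWhile pvIsVW rest).count 'v' : Int))) 2),
            b + (2 * (w + ((c :: List.takeWhile pvIsVW rest).count 'w' : Int)) + (v + ((c :: List.takeWhile pvIsVW rest).count 'v' : Int)))), 0, 0) := by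
  induction rest with
  | nil =>
    intro c a b v w h
    have hc : c = 'v' ∨ c = 'w' := by simpa [pvIsVW] using h
    have hstep : pvARecSt [c] ((a, b), v, w)
        = pvARecSt ([] : List Char)
            ((a + (get_min_and_max_of_v_w_substring (if is_char_v c then v + 1 else v) (if is_char_v c then w else w + 1)).1,
              b + (get_min_and_max_of_v_w_substring (if is_char_v c then v + 1 else v) (if is_char_v c then w else w + 1)).2), 0, 0) := by
      show pvARecSt ([] : List Char) _ = _
      simp [pvARecSt, pvVW_eq, h]
    rw [hstep]
    simp only [List.dropWhile_nil, List.takeWhile_nil]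
    congr 2 <;>
      (rcases hc with hc | hc <;> subst hc <;>
        simp [is_char_v, get_min_and_max_of_v_w_substring, List.count_cons] <;> try ring_nf)
  | cons d r2 ih =>
    intro c a b v w h
    have hc : c = 'v' ∨ c = 'w' := by simpa [pvIsVW] using h
    by_cases hd : pvIsVW d = true
    · have hstep : pvARecSt (c :: d :: r2) ((a, b), v, w)
          = pvARecSt (d :: r2) ((a, b), (if is_char_v c then v + 1 else v), (if is_char_v c then w else w + 1)) := by
        simp [pvARecSt, pvVW_eq, h, hd]
      rw [hstep, ih d _ _ _ _ hd]
      rw [List.dropWhile_cons_of_pos hd, List.takeWhile_cons_of_pos hd]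
      rcases hc with hc | hc <;> subst hc <;>
        simp [is_char_v, List.count_cons] <;> try ring_nf
    · simp only [Bool.not_eq_true] at hd
      have hdr : List.dropWhile pvIsVW (d :: r2) = d :: r2 := List.dropWhile_cons_of_neg (by simp [hd])
      have htk : List.takeWhile pvIsVW (d :: r2) = ([] : List Char) := List.takeWhile_cons_of_neg (by simp [hd])
      have hstep : pvARecSt (c :: d :: r2) ((a, b), v, w)
          = pvARecSt (d :: r2)
              ((a + (get_min_and_max_of_v_w_substring (if is_char_v c then v + 1 else v) (if is_char_v c then w else w + 1)).1,
                b + (get_min_and_max_of_v_w_substring (if is_char_v c then v + 1 else v) (if is_char_v c then w else w + 1)).2), 0, 0) := by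
        have hd1 : d ≠ 'v' := by intro hx; subst hx; simp [pvIsVW] at hd
        have hd2 : d ≠ 'w' := by intro hx; subst hx; simp [pvIsVW] at hd
        rcases hc with hc | hc <;> subst hc <;>
          simp [pvARecSt, pvVW_eq, is_char_v, pvIsVW, hd1, hd2]
      rw [hstep, hdr, htk]
      congr 2 <;>
        (rcases hc with hc | hc <;> subst hc <;>
          simp [is_char_v, get_min_and_max_of_v_w_substring, List.count_cons] <;> try ring_nf)

-- main bridge: A's replay starting with zero pending counters computes B's run walk
theorem pv_main (n : Nat) : ∀ (l : List Char), l.length ≤ n → ∀ (a b : Int),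
    pvARecSt l ((a, b), 0, 0) = ((a + (pvAltGo l).1, b + (pvAltGo l).2), 0, 0) := by
  induction n with
  | zero =>
    intro l hl a b
    cases l with
    | nil => simp [pvARecSt, pvAltGo, pvAltGoF]
    | cons c r => simp at hl
  | succ n ih =>
    intro l hl a b
    cases l with
    | nil => simp [pvARecSt, pvAltGo, pvAltGoF]
    | cons c rest =>
      by_cases hk : pvIsVW c = true
      · rw [pv_run rest c a b 0 0 hk]
        have hlen : (List.dropWhile pvIsVW rest).length ≤ n := by
          have := List.length_dropWhile_le pvIsVW rest; simp at hl; omega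
        rw [ih _ hlen]
        rw [pvAltGo_cons]
        simp only [zero_add]
        rw [pv_ceil_eq]
        simp [hk, add_assoc]
      · simp only [Bool.not_eq_true] at hk
        have hstep : pvARecSt (c :: rest) ((a, b), 0, 0) = pvARecSt rest ((a + 1, b + 1), 0, 0) := by
          simp [pvARecSt, pvVW_eq, hk]
        have hlen : rest.length ≤ n := by simp at hl; omega
        rw [hstep, ih _ hlen, pvAltGo_cons_neg c rest hk]
        simp [add_comm, add_assoc, add_left_comm]

-- ===== VERDICT (by name: the statement is the Claim_ definition above) =====
theorem get_min_and_max_len_of_string_spec : Claim_equal_get_min_and_max_len_of_string := by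
  intro str_len s _ hpre
  unfold Spec_get_min_and_max_len_of_string get_min_and_max_len_of_string_alt
  unfold Pre_get_min_and_max_len_of_string at hpre
  rw [pvA_eq_fold]
  by_cases hneg : str_len ≤ 0
  · rw [PySem.List.pyRange_one_eq_nil (by omega)]
    have hm : max 0 str_len = (0 : Int) := by omega
    have hsl : PySem.List.slice s.toList none (some (0 : Int)) = s.toList.take (0 : Int).toNat :=
      PySem.List.slice_to s.toList (by omega)
    rw [hm, hsl]
    simp [pvAltGo, pvAltGoF]
  · push_neg at hneg
    have hm : max 0 str_len = str_len := by omega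
    have hsl : PySem.List.slice s.toList none (some str_len) = s.toList.take str_len.toNat :=
      PySem.List.slice_to s.toList (by omega)
    rw [hm, hsl]
    set cs := s.toList with hcs
    set l := cs.take str_len.toNat with hl
    have hlen : (l.length : Int) = str_len := by
      rw [hl, List.length_take]
      have : str_len.toNat ≤ cs.length := by omega
      simp [this]; omega
    have happ : l ++ cs.drop str_len.toNat = cs := by rw [hl]; exact List.take_append_drop _ _
    have := pv_fold_eq_rec l [] (cs.drop str_len.toNat) ((0, 0), 0, 0)
    simp only [List.nil_append, List.length_nil, Nat.cast_zero, zero_add, happ, hlen] at this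
    rw [this, pv_main l.length l (Nat.le_refl _) 0 0]
    simp
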